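-- pv_equiv track=rewrite | github.com/asweigart/programmedpatterns | book/visualpatterns.py | pattern65
-- ===== SOURCE A (Python) =====
-- def pattern65(step):
--     width = 1
--     height = 1
--     for i in range(2, step + 1):
--         if i % 3 == 0:
--             width += 3
--             height += 2
--         elif i % 3 == 1:
--             width -= 1
--             height -= 1
--     row = ('O' * width) + '\n'
--     pattern = row * height
--     return pattern
-- ===== SOURCE B (Python) =====
-- def pattern65(step):
--     c0 = max(0, step // 3)            # count of i in [2, step] with i % 3 == 0
--     c1 = max(0, (step - 4) // 3 + 1)  # count of i in [2, step] with i % 3 == 1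
--     width = 1 + 3 * c0 - c1
--     height = 1 + 2 * c0 - c1
--     return (('O' * width) + '\n') * height
-- ===== Notes on version B (the rewrite author's own statement) =====
-- stated objective: simpler
-- what changed: Replaces A's loop over range(2, step+1) with closed-form clamped floor-division counts of the residues (i%3==0 and i%3==1), computing width and height arithmetically.
import Mathlib
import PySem

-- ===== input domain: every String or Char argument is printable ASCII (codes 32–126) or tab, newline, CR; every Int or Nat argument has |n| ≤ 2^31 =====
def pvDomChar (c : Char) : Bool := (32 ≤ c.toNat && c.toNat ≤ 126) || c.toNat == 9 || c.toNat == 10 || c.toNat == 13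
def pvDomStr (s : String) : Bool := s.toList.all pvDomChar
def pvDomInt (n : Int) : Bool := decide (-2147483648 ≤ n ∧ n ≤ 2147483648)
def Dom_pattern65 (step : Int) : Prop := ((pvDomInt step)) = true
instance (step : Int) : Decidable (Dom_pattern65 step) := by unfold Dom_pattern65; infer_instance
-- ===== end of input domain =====

-- B replaces A's counting loop by closed-form clamped floor-division counts (objective: simpler).

-- ===== PORT A =====
-- A's for-loop over range(2, step+1) accumulating (width, height)
def pattern65Loop (step : Int) : Int × Int :=
  (PySem.List.pyRange 2 (step + 1) 1).foldl
    (fun (wh : Int × Int) i =>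
      if PySem.Int.mod i 3 = 0 then (wh.1 + 3, wh.2 + 2)
      else if PySem.Int.mod i 3 = 1 then (wh.1 - 1, wh.2 - 1)
      else wh) (1, 1)

def pattern65 (step : Int) : String :=
  let wh := pattern65Loop step
  -- 'O' * width (+ '\n'), then row * height: Python string repetition clamps a
  -- non-positive count to the empty string, exactly List.replicate _.toNat
  let row : List Char := List.replicate wh.1.toNat 'O' ++ ['\n']
  String.ofList (List.flatten (List.replicate wh.2.toNat row))

-- ===== PORT B =====
def pattern65_alt (step : Int) : String :=
  let c0 := max 0 (PySem.Int.floordiv step 3)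
  let c1 := max 0 (PySem.Int.floordiv (step - 4) 3 + 1)
  let width := 1 + 3 * c0 - c1
  let height := 1 + 2 * c0 - c1
  String.ofList (List.flatten (List.replicate height.toNat
    (List.replicate width.toNat 'O' ++ ['\n'])))

-- ===== PRECONDITION & SPEC =====
def Spec_pattern65 (step : Int) (out : String) : Prop := out = pattern65_alt step
instance (step : Int) (out : String) : Decidable (Spec_pattern65 step out) := by unfold Spec_pattern65; infer_instance

-- ===== CLAIM (what is proved, stated in full; the proofs are below) =====
def Claim_equal_pattern65 : Prop := ∀ (step : Int), Dom_pattern65 step → Spec_pattern65 step (pattern65 step)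

-- ===== LEMMAS AND PROOFS =====

-- The loop's final state equals B's closed-form counts.
theorem pattern65Loop_eq (step : Int) :
    pattern65Loop step =
      (1 + 3 * max 0 (PySem.Int.floordiv step 3) - max 0 (PySem.Int.floordiv (step - 4) 3 + 1),
       1 + 2 * max 0 (PySem.Int.floordiv step 3) - max 0 (PySem.Int.floordiv (step - 4) 3 + 1)) := by
  rcases le_or_gt step 1 with h | h
  · unfold pattern65Loop
    rw [PySem.List.pyRange_one_eq_nil (by omega)]
    rw [PySem.Int.floordiv_eq_ediv_of_pos (by norm_num),
        PySem.Int.floordiv_eq_ediv_of_pos (by norm_num)]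
    simp only [List.foldl_nil]
    exact Prod.ext (by simp; omega) (by simp; omega)
  · have h1 : (1:Int) ≤ step := by omega
    clear h
    induction step, h1 using Int.le_induction with
    | base =>
      unfold pattern65Loop
      rw [show (1:Int) + 1 = 2 by norm_num, PySem.List.pyRange_one_eq_nil (by omega)]
      decide
    | succ n hn ih =>
      have ihn := ih
      unfold pattern65Loop at ihn ⊢
      rw [show n + 1 + 1 = (n + 1) + 1 by ring,
          PySem.List.pyRange_one_succ_right (by omega), List.foldl_append]
      rw [ihn]
      simp only [List.foldl_cons, List.foldl_nil]
      rw [PySem.Int.mod_eq_emod_of_pos (by norm_num)]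
      rw [PySem.Int.floordiv_eq_ediv_of_pos (by norm_num),
          PySem.Int.floordiv_eq_ediv_of_pos (by norm_num),
          PySem.Int.floordiv_eq_ediv_of_pos (by norm_num),
          PySem.Int.floordiv_eq_ediv_of_pos (by norm_num)]
      split_ifs with h0 hone
      · exact Prod.ext (by simp; omega) (by simp; omega)
      · exact Prod.ext (by simp; omega) (by simp; omega)
      · exact Prod.ext (by simp; omega) (by simp; omega)

-- ===== VERDICT (by name: the statement is the Claim_ definition above) =====
theorem pattern65_spec : Claim_equal_pattern65 := by
  intro step _
  unfold Spec_pattern65 pattern65 pattern65_alt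
  rw [pattern65Loop_eq]
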